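-- pv_equiv track=rewrite | github.com/atwang16/6863_cgw_tempered_engulfed | grammar.py | enumerate_parameters
-- ===== SOURCE A (Python) =====
-- def enumerate_parameters(parameters):
-- 	if len(parameters) == 0:
-- 		return [""]
-- 	return [
-- 		p + suffix
-- 		for p in enumerate_parameters(parameters[1:])
-- 		for suffix in (parameters[0], "")
-- 	]
-- ===== SOURCE B (Python) =====
-- def enumerate_parameters(parameters):
--     acc = [""]
--     for param in reversed(parameters):
--         acc = [p + suffix for p in acc for suffix in (param, "")]
--     return acc
-- ===== Notes on version B (the rewrite author's own statement) =====
-- stated objective: alternative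
-- what changed: Replaced head-slicing recursion with an iterative fold over reversed(parameters) that rebuilds the prefix list bottom-up.
import Mathlib
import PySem

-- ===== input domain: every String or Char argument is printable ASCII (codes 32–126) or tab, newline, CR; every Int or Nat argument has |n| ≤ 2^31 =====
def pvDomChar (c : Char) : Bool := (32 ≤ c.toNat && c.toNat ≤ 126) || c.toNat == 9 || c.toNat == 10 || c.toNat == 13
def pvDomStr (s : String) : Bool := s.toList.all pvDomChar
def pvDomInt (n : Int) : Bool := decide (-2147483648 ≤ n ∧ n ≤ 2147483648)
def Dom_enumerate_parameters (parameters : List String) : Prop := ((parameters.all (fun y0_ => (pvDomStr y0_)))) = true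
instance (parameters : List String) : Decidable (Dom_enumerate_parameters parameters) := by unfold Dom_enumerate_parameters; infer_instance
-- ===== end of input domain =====

-- B iterates a fold over reversed(parameters) instead of A's head-slicing recursion (alternative decomposition, same result).


-- ===== PORT A =====
def enumerate_parameters (parameters : List String) : List String :=
  match parameters with
  | [] => [""]
  | x :: xs => (enumerate_parameters xs).flatMap (fun p => [p ++ x, p ++ ""])

-- ===== PORT B =====
def enumerate_parameters_alt (parameters : List String) : List String :=
  parameters.reverse.foldl (fun acc param => acc.flatMap (fun p => [p ++ param, p ++ ""])) [""]

-- ===== PRECONDITION & SPEC =====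
def Spec_enumerate_parameters (parameters : List String) (out : List String) : Prop := out = enumerate_parameters_alt parameters
instance (parameters : List String) (out : List String) : Decidable (Spec_enumerate_parameters parameters out) := by unfold Spec_enumerate_parameters; infer_instance

-- ===== CLAIM (what is proved, stated in full; the proofs are below) =====
def Claim_equal_enumerate_parameters : Prop := ∀ (parameters : List String), Dom_enumerate_parameters parameters → Spec_enumerate_parameters parameters (enumerate_parameters parameters)

-- ===== LEMMAS AND PROOFS =====
theorem enumerate_parameters_eq (parameters : List String) :
    enumerate_parameters parameters = enumerate_parameters_alt parameters := by
  induction parameters with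
  | nil => rfl
  | cons x xs ih =>
    simp only [enumerate_parameters, enumerate_parameters_alt, List.reverse_cons,
      List.foldl_append, List.foldl_cons, List.foldl_nil] at *
    rw [ih]

-- ===== VERDICT (by name: the statement is the Claim_ definition above) =====
theorem enumerate_parameters_spec : Claim_equal_enumerate_parameters := by
  intro parameters _
  exact enumerate_parameters_eq parameters
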